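-- pv_equiv track=rewrite | github.com/yichenhock/EngineeringBot | cogs/MiscCommands.py | txt2emoji
-- ===== SOURCE A (Python) =====
-- def txt2emoji(txt):
--     alphabet = ['a','b','c','d','e','f','g','h','i','j','k','l','m','n','o','p','q','r','s','t','u','v','w','x','y','z']
--     txt_chara = list(txt)
--     for index in range(len(txt_chara)):
--         if txt_chara[index] in alphabet:
--             txt_chara[index] = ":regional_indicator_"+txt_chara[index]+":"
--         elif txt_chara[index] == "B":
--             txt_chara[index] = ":b:"
--         elif txt_chara[index] == "!":
--             txt_chara[index] = ":exclamation:"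
--         elif txt_chara[index] == "?":
--             txt_chara[index] = ":question:"
--     return "".join(txt_chara)
-- ===== SOURCE B (Python) =====
-- def txt2emoji(txt):
--     SPECIAL = {"B": "b", "!": "exclamation", "?": "question"}
--     parts = []
--     i, n = 0, len(txt)
--     while i < n:
--         j = i
--         while j < n and not ("a" <= txt[j] <= "z") and txt[j] not in SPECIAL:
--             j += 1
--         parts.append(txt[i:j])          # untouched run copied as one slice
--         if j < n:
--             c = txt[j]
--             name = "regional_indicator_" + c if "a" <= c <= "z" else SPECIAL[c]
--             parts.append(":" + name + ":")
--             j += 1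
--         i = j
--     return "".join(parts)
-- ===== Notes on version B (the rewrite author's own statement) =====
-- stated objective: alternative
-- what changed: Replaces A's per-index loop with an if/elif cascade at every character by a run-based two-pointer scan that copies each maximal run of untranslated characters as a single slice and emits one uniform colon-wrapped emoji name at each run boundary.
import Mathlib
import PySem

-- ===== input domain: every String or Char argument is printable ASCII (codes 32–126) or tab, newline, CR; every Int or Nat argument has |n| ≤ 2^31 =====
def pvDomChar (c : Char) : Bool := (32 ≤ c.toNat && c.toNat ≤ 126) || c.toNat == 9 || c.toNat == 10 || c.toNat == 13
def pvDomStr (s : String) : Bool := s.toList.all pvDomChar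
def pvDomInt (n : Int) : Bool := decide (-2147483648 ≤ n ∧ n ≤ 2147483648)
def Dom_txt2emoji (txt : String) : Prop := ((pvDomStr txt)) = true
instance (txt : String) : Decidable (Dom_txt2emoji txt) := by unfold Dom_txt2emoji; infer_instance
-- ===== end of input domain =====

-- B replaces A's per-index branch loop by a run-based scan: it finds each maximal run of
-- untranslated characters, copies it as one slice, and emits the uniform ":name:" code
-- at each run boundary (objective: alternative).
-- ===== PORT A =====
def alphA : List String := ["a", "b", "c", "d", "e", "f", "g", "h", "i", "j", "k", "l", "m", "n", "o", "p", "q", "r", "s", "t", "u", "v", "w", "x", "y", "z"]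

def stepA (s : String) : String :=
  if s ∈ alphA then ":regional_indicator_" ++ s ++ ":"
  else if s = "B" then ":b:"
  else if s = "!" then ":exclamation:"
  else if s = "?" then ":question:"
  else s

-- list(txt) is the list of 1-char strings; the for-loop mutates txt_chara[index] in
-- place; acc[index] is always in range inside `for index in range(len(...))`, so the
-- in-range read is rendered with getD (exact there).
def txt2emoji (txt : String) : String :=
  PySem.Str.join "" ((List.range (txt.toList.map (fun c => String.ofList [c])).length).foldl
    (fun acc index => acc.set index (stepA (acc.getD index "")))
    (txt.toList.map (fun c => String.ofList [c])))

-- ===== PORT B =====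
def specialB : PySem.Dict String String :=
  PySem.Dict.mk [("B", "b"), ("!", "exclamation"), ("?", "question")]

-- the inner while's guard; `"a" <= txt[j] <= "z"` on the 1-char string txt[j] is exactly
-- 'a' ≤ c ≤ 'z' on its character (Python compares the same code points).
def untransB (c : Char) : Bool :=
  !(decide ('a' ≤ c ∧ c ≤ 'z')) && !(specialB.contains (String.ofList [c]))

-- `":" + name + ":"`; SPECIAL[c] is in range here (c is translatable and not lowercase),
-- so the lookup is rendered with getD (exact there).
def emojiB (c : Char) : String :=
  ":" ++ (if 'a' ≤ c ∧ c ≤ 'z' then "regional_indicator_" ++ String.ofList [c]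
          else specialB.getD (String.ofList [c]) "") ++ ":"

-- the outer while loop: each iteration takes the maximal untranslated run (the inner
-- while is a span scan), appends it as one slice, then the emoji of the boundary char.
def goB (l : List Char) : List String :=
  if l = [] then []
  else
    match h : l.dropWhile untransB with
    | [] => [String.ofList (l.takeWhile untransB)]
    | c :: rest => String.ofList (l.takeWhile untransB) :: emojiB c :: goB rest
termination_by l.length
decreasing_by
  have h1 : (l.dropWhile untransB).length ≤ l.length := List.length_dropWhile_le _ _
  rw [h] at h1
  simp at h1
  omega

def txt2emoji_alt (txt : String) : String := PySem.Str.join "" (goB txt.toList)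

-- ===== PRECONDITION & SPEC =====
def Spec_txt2emoji (txt : String) (out : String) : Prop := out = txt2emoji_alt txt
instance (txt : String) (out : String) : Decidable (Spec_txt2emoji txt out) := by unfold Spec_txt2emoji; infer_instance

-- ===== CLAIM (what is proved, stated in full; the proofs are below) =====
def Claim_equal_txt2emoji : Prop := ∀ (txt : String), Dom_txt2emoji txt → Spec_txt2emoji txt (txt2emoji txt)

-- ===== LEMMAS AND PROOFS =====
-- A's index loop, which sets each position once from its own old value, is the map of stepA.
theorem fold_set_map (f : String → String) (pre xs : List String) :
    (List.range' pre.length xs.length).foldl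
      (fun acc i => acc.set i (f (acc.getD i ""))) (pre ++ xs) = pre ++ xs.map f := by
  induction xs generalizing pre with
  | nil => simp
  | cons x xs ih =>
    simp only [List.length_cons, List.range'_succ, List.foldl_cons]
    have hget : (pre ++ x :: xs).getD pre.length "" = x := by
      simp [List.getD]
    have hset : (pre ++ x :: xs).set pre.length (f x) = (pre ++ [f x]) ++ xs := by
      simp
    rw [hget, hset]
    have h := ih (pre := pre ++ [f x])
    simp only [List.length_append, List.length_cons, List.length_nil] at h ⊢
    simpa [List.append_assoc] using h

theorem fold_set_map0 (f : String → String) (xs : List String) :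
    (List.range' 0 xs.length).foldl (fun acc i => acc.set i (f (acc.getD i ""))) xs = xs.map f := by
  simpa using fold_set_map f [] xs

-- "".join is concatenation
theorem join_nil_eq_flatten (ps : List (List Char)) :
    PySem.Chars.join [] ps = ps.flatten := by
  match ps with
  | [] => simp [PySem.Chars.join_nil]
  | [p] => simp [PySem.Chars.join_singleton]
  | p :: q :: rest =>
    rw [PySem.Chars.join_cons_cons, join_nil_eq_flatten (q :: rest)]
    simp

-- the 1-char string of c is a lowercase-letter entry of A's alphabet iff c is lowercase
theorem mem_alphA_iff (c : Char) :
    (String.ofList [c] ∈ alphA) ↔ ('a' ≤ c ∧ c ≤ 'z') := by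
  constructor
  · intro hm
    simp only [alphA, List.mem_cons, List.not_mem_nil, or_false] at hm
    rcases hm with h|h|h|h|h|h|h|h|h|h|h|h|h|h|h|h|h|h|h|h|h|h|h|h|h|h <;>
      (replace h := congrArg String.toList h; simp at h; subst h; decide)
  · rintro ⟨h1, h2⟩
    simp only [Char.le_def, UInt32.le_iff_toNat_le] at h1 h2
    set n := c.toNat with hn
    have hb1 : 97 ≤ n := by simpa using h1
    have hb2 : n ≤ 122 := by simpa using h2
    interval_cases n <;> (rw [← Char.ofNat_toNat c, ← hn]; decide)

-- an untranslated character is left alone by A's cascade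
theorem step_id (c : Char) (h : untransB c = true) :
    stepA (String.ofList [c]) = String.ofList [c] := by
  simp only [untransB, Bool.and_eq_true, Bool.not_eq_true'] at h
  obtain ⟨hl, hs⟩ := h
  simp only [decide_eq_false_iff_not] at hl
  simp only [specialB, PySem.Dict.contains_mk, List.any_cons, List.any_nil,
    Bool.or_eq_false_iff, beq_eq_false_iff_ne, ne_eq] at hs
  rw [stepA, if_neg (fun hm => hl ((mem_alphA_iff c).mp hm)),
    if_neg (fun hB => hs.1 hB.symm), if_neg (fun hE => hs.2.1 hE.symm),
    if_neg (fun hQ => hs.2.2.1 hQ.symm)]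

-- the boundary character gets the same emoji code from both programs
theorem step_emoji (c : Char) (h : untransB c = false) :
    stepA (String.ofList [c]) = emojiB c := by
  simp only [untransB, Bool.and_eq_false_iff, Bool.not_eq_false', decide_eq_true_eq] at h
  rcases h with hl | hs
  · rw [stepA, if_pos ((mem_alphA_iff c).mpr hl), emojiB, if_pos hl]
    apply String.toList_inj.mp
    simp
  · simp only [specialB, PySem.Dict.contains_mk, List.any_cons, List.any_nil,
      Bool.or_eq_true, beq_iff_eq] at hs
    rcases hs with h | h | h | h
    all_goals first
      | (replace h := congrArg String.toList h.symm; simp at h; subst h; decide)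
      | exact absurd h (by simp)

theorem flatten_singletons (m : List Char) : (m.map (fun c => [c])).flatten = m := by
  induction m with
  | nil => rfl
  | cons a m ih => simp [ih]

-- characters of the untranslated run pass through both programs as themselves
theorem run_flatten (m : List Char) (hm : ∀ c ∈ m, untransB c = true) :
    (m.map (fun c => (stepA (String.ofList [c])).toList)).flatten = m := by
  have hmap : m.map (fun c => (stepA (String.ofList [c])).toList) = m.map (fun c => [c]) :=
    List.map_congr_left (fun a ha => by rw [step_id a (hm a ha)]; simp)
  rw [hmap]
  exact flatten_singletons m

-- B's run-based scan joins to the same string as A's per-character map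
theorem goB_join (l : List Char) :
    ((goB l).map String.toList).flatten
      = ((l.map (fun c => stepA (String.ofList [c]))).map String.toList).flatten := by
  induction l using goB.induct with
  | case1 => simp [goB]
  | case2 l hne h =>
    have hrun : l.takeWhile untransB = l := by
      have ht := List.takeWhile_append_dropWhile (p := untransB) (l := l)
      rw [h] at ht
      simpa using ht
    rw [goB, if_neg hne, h]
    simp only [List.map_cons, List.map_nil, List.flatten_cons, List.flatten_nil,
      List.append_nil, List.map_map]
    rw [hrun]
    simp only [String.toList_ofList]
    exact (run_flatten l (fun c hc => List.mem_takeWhile_imp (hrun ▸ hc))).symm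
  | case3 l hne c rest h ih =>
    have hsplit : l = l.takeWhile untransB ++ c :: rest := by
      have ht := List.takeWhile_append_dropWhile (p := untransB) (l := l)
      rw [h] at ht
      exact ht.symm
    have hc : untransB c = false := by
      have hh := List.head?_dropWhile_not untransB l
      rw [h] at hh
      simpa using hh
    rw [goB, if_neg hne, h]
    conv_rhs => rw [hsplit]
    simp only [List.map_cons, List.map_append, List.flatten_cons, List.flatten_append,
      List.map_map, String.toList_ofList, Function.comp_def]
    rw [run_flatten (l.takeWhile untransB) (fun a ha => List.mem_takeWhile_imp ha)]
    rw [step_emoji c hc]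
    simp only [List.map_map, Function.comp_def] at ih
    simp [ih]

-- ===== VERDICT (by name: the statement is the Claim_ definition above) =====
theorem txt2emoji_spec : Claim_equal_txt2emoji := by
  intro txt _
  unfold Spec_txt2emoji txt2emoji txt2emoji_alt
  apply String.toList_inj.mp
  rw [List.range_eq_range', fold_set_map0 stepA, List.map_map]
  rw [PySem.Str.toList_join, PySem.Str.toList_join]
  simp only [String.toList_empty]
  rw [join_nil_eq_flatten, join_nil_eq_flatten]
  have := goB_join txt.toList
  simp only [Function.comp_def] at this ⊢
  rw [this]
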